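-- pv_equiv track=rewrite | github.com/cz-fish/advent-of-code | day2.py | count
-- ===== SOURCE A (Python) =====
-- def count(x):
--     p = {}
--     for c in x:
--         if c not in p:
--             p[c] = 0
--         p[c] += 1
--     two = False
--     three = False
--     for k,v in p.items():
--         if v == 2: two=True
--         if v == 3: three = True
--     return ([0,1][two], [0,1][three])
-- ===== SOURCE B (Python) =====
-- def count(x):
--     # Sort the characters and sweep runs of equal characters, flagging
--     # runs of length exactly 2 / exactly 3 (no hash-based counter).
--     two = False
--     three = False
--     run = 0
--     prev = None
--     for c in sorted(x):
--         if prev is not None and c == prev: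
--             run += 1
--         else:
--             if run == 2:
--                 two = True
--             if run == 3:
--                 three = True
--             prev = c
--             run = 1
--     if run == 2:
--         two = True
--     if run == 3:
--         three = True
--     return (1 if two else 0, 1 if three else 0)
-- ===== Notes on version B (the rewrite author's own statement) =====
-- stated objective: alternative
-- what changed: B replaces A's dict-based frequency counting (build a hash counter, then scan its items) by sorting the characters and sweeping runs of equal characters in one pass, flagging runs of length exactly 2 or 3.
import Mathlib
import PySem

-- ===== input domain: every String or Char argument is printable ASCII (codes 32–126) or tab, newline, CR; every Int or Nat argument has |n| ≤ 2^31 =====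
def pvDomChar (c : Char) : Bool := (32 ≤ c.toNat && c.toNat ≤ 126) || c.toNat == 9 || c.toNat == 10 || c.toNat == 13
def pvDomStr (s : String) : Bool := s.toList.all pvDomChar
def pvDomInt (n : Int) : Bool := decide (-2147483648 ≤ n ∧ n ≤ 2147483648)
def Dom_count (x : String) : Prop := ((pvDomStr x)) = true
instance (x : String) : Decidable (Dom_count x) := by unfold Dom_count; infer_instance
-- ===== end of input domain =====

-- B replaces A's dict-based frequency counter by sort-then-sweep over runs of equal
-- characters; same return value, a genuinely different algorithm (alternative, not faster).

-- ===== PORT A =====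
def count (x : String) : Int × Int :=
  let p := x.toList.foldl
    (fun (p : PySem.Dict Char Int) c =>
      let p := if p.contains c then p else p.insert c 0;  -- if c not in p: p[c] = 0
      p.insert c (p.getD c 0 + 1))                        -- p[c] += 1
    PySem.Dict.empty
  let tt := p.items.foldl
    (fun (tt : Bool × Bool) kv =>
      (if kv.2 == 2 then true else tt.1, if kv.2 == 3 then true else tt.2))
    (false, false)
  ((if tt.1 then 1 else 0), (if tt.2 then 1 else 0))      -- ([0,1][two], [0,1][three])

-- ===== PORT B =====
-- one step of Source B's loop body; state = (two, three, run, prev)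
def countAltStep (st : Bool × Bool × Int × Option Char) (c : Char) :
    Bool × Bool × Int × Option Char :=
  if (match st.2.2.2 with | some p => c == p | none => false) then
    (st.1, st.2.1, st.2.2.1 + 1, st.2.2.2)
  else
    (if st.2.2.1 == 2 then true else st.1,
     if st.2.2.1 == 3 then true else st.2.1,
     1, some c)

def count_alt (x : String) : Int × Int :=
  let st := (PySem.List.sorted x.toList (fun c => c)).foldl countAltStep
      (false, false, (0 : Int), (none : Option Char))
  let two := if st.2.2.1 == 2 then true else st.1
  let three := if st.2.2.1 == 3 then true else st.2.1
  ((if two then 1 else 0), (if three then 1 else 0))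

-- ===== PRECONDITION & SPEC =====
def Spec_count (x : String) (out : Int × Int) : Prop := out = count_alt x
instance (x : String) (out : Int × Int) : Decidable (Spec_count x out) := by unfold Spec_count; infer_instance

-- ===== CLAIM (what is proved, stated in full; the proofs are below) =====
def Claim_equal_count : Prop := ∀ (x : String), Dom_count x → Spec_count x (count x)

-- ===== LEMMAS AND PROOFS =====

-- ---- shared counting fact ----
theorem exists_count_replicate_append {k : Nat} (hk : 0 < k) (cur : Char) (n : Nat)
    (m : List Char) (hm : cur ∉ m) :
    (∃ d, (List.replicate n cur ++ m).count d = k) ↔ (n = k ∨ ∃ d, m.count d = k) := by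
  constructor
  · rintro ⟨d, hd⟩
    rw [List.count_append, List.count_replicate] at hd
    by_cases h : d = cur
    · subst h
      simp [List.count_eq_zero_of_not_mem hm] at hd
      exact Or.inl hd
    · rw [if_neg (fun h' => h (beq_iff_eq.mp h').symm)] at hd
      simp at hd
      exact Or.inr ⟨d, hd⟩
  · rintro (h | ⟨d, hd⟩)
    · refine ⟨cur, ?_⟩
      rw [List.count_append, List.count_replicate,
        List.count_eq_zero_of_not_mem hm]
      simp [h]
    · refine ⟨d, ?_⟩
      have hdm : d ∈ m := by
        by_contra hc
        rw [List.count_eq_zero_of_not_mem hc] at hd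
        omega
      have hdc : d ≠ cur := fun h => hm (h ▸ hdm)
      rw [List.count_append, List.count_replicate,
        if_neg (fun h' => hdc (beq_iff_eq.mp h').symm)]
      simp [hd]

-- ---- A side ----
theorem stepA_eq_modify (d : PySem.Dict Char Int) (c : Char) :
    (let d' := if d.contains c then d else d.insert c 0;
     d'.insert c (d'.getD c 0 + 1)) = d.modify c 0 (· + 1) := by
  by_cases h : d.contains c
  · simp [h, PySem.Dict.modify]
  · simp [h, PySem.Dict.modify, PySem.Dict.getD_insert_self,
      PySem.Dict.insert_insert_self, PySem.Dict.getD_of_not_contains]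

theorem flags_fold (items : List (Char × Int)) : ∀ (f2 f3 : Bool),
    items.foldl
      (fun (tt : Bool × Bool) kv =>
        (if kv.2 == 2 then true else tt.1, if kv.2 == 3 then true else tt.2))
      (f2, f3)
    = (f2 || items.any (fun p => p.2 == 2), f3 || items.any (fun p => p.2 == 3)) := by
  induction items with
  | nil => intro f2 f3; simp
  | cons kv rest ih =>
    intro f2 f3
    rw [List.foldl_cons, ih]
    cases hb2 : (kv.2 == 2) <;> cases hb3 : (kv.2 == 3) <;>
      simp [hb2, hb3]

theorem any_count_iff (xs : List Char) (kN : Nat) (hk : 0 < kN) :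
    (xs.any (fun d => xs.count d == kN)) = true ↔ ∃ d, xs.count d = kN := by
  simp only [List.any_eq_true, beq_iff_eq]
  constructor
  · rintro ⟨d, _, h⟩; exact ⟨d, h⟩
  · rintro ⟨d, h⟩
    refine ⟨d, ?_, h⟩
    by_contra hm
    rw [List.count_eq_zero_of_not_mem hm] at h
    omega

theorem countA_flags (x : String) :
    count x = ((if x.toList.any (fun d => x.toList.count d == 2) then 1 else 0),
               (if x.toList.any (fun d => x.toList.count d == 3) then 1 else 0)) := by
  have hf : (fun (p : PySem.Dict Char Int) c =>
      let p := if p.contains c then p else p.insert c 0;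
      p.insert c (p.getD c 0 + 1))
      = (fun (d : PySem.Dict Char Int) c => d.modify c 0 (· + 1)) := by
    funext p c; exact stepA_eq_modify p c
  unfold count
  dsimp only
  rw [hf, ← PySem.Dict.counter_eq_foldl, PySem.Dict.items_counter, flags_fold,
    List.any_map, List.any_map]
  have key : ∀ (kZ : Int) (kN : Nat), (kN : Int) = kZ → 0 < kN →
      ((PySem.Set.ofList x.toList).any
        ((fun p => p.2 == kZ) ∘ fun k => (k, (List.count k x.toList : Int))))
      = (x.toList.any (fun d => x.toList.count d == kN)) := by
    intro kZ kN hkz hk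
    rw [Bool.eq_iff_iff, any_count_iff _ _ hk]
    simp only [List.any_eq_true, Function.comp, beq_iff_eq]
    constructor
    · rintro ⟨d, _, h⟩; exact ⟨d, by omega⟩
    · rintro ⟨d, h⟩
      refine ⟨d, ?_, by omega⟩
      rw [PySem.Set.mem_ofList]
      by_contra hm
      rw [List.count_eq_zero_of_not_mem hm] at h
      omega
  rw [key 2 2 rfl (by norm_num), key 3 3 rfl (by norm_num)]
  simp

-- ---- B side ----
-- the characters already consumed into the current run
def pvPre (run : Int) (prev : Option Char) : List Char :=
  match prev with
  | none => []
  | some c => List.replicate run.toNat c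

theorem if_flag (f : Bool) (run : Int) (kZ : Int) (kN : Nat)
    (hk : (kN : Int) = kZ) (hr : 0 < run) :
    ((if run == kZ then true else f) = true) ↔ (f = true ∨ run.toNat = kN) := by
  by_cases h : run = kZ
  · rw [if_pos (by simpa using h)]
    exact ⟨fun _ => Or.inr (by omega), fun _ => rfl⟩
  · rw [if_neg (by simpa using h)]
    constructor
    · exact Or.inl
    · rintro (hf | hn)
      · exact hf
      · exfalso; omega

theorem sweep_spec (l : List Char) : ∀ (f2 f3 : Bool) (run : Int) (prev : Option Char),
    l.Pairwise (· ≤ ·) →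
    (match prev with
     | none => run = 0
     | some cur => 0 < run ∧ ∀ y ∈ l, cur ≤ y) →
    (((if (l.foldl countAltStep (f2, f3, run, prev)).2.2.1 == 2 then true
        else (l.foldl countAltStep (f2, f3, run, prev)).1) = true
        ↔ (f2 = true ∨ ∃ d, (pvPre run prev ++ l).count d = 2)) ∧
     ((if (l.foldl countAltStep (f2, f3, run, prev)).2.2.1 == 3 then true
        else (l.foldl countAltStep (f2, f3, run, prev)).2.1) = true
        ↔ (f3 = true ∨ ∃ d, (pvPre run prev ++ l).count d = 3))) := by
  induction l with
  | nil =>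
    intro f2 f3 run prev _ hinv
    cases prev with
    | none =>
      have hrun : run = 0 := hinv
      subst hrun
      simp [pvPre]
    | some cur =>
      obtain ⟨hr, -⟩ := hinv
      have h2 := exists_count_replicate_append (k := 2) (by norm_num) cur run.toNat []
        (List.not_mem_nil)
      have h3 := exists_count_replicate_append (k := 3) (by norm_num) cur run.toNat []
        (List.not_mem_nil)
      simp only [List.count_nil, List.append_nil, exists_const] at h2 h3
      simp only [List.foldl_nil, pvPre, List.append_nil]
      rw [h2, h3, if_flag f2 run 2 2 rfl hr, if_flag f3 run 3 3 rfl hr]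
      constructor <;> (constructor <;> (rintro (h | h) <;> first | exact Or.inl h | exact Or.inr (by omega)))
  | cons c rest ih =>
    intro f2 f3 run prev hpw hinv
    obtain ⟨hc, hpw'⟩ := List.pairwise_cons.mp hpw
    simp only [List.foldl_cons]
    cases prev with
    | none =>
      have hrun : run = 0 := hinv
      subst hrun
      have hstep : countAltStep (f2, f3, (0 : Int), none) c = (f2, f3, (1 : Int), some c) := by
        simp [countAltStep]
      rw [hstep]
      have := ih f2 f3 1 (some c) hpw' ⟨by norm_num, hc⟩
      simpa [pvPre] using this
    | some cur =>
      obtain ⟨hr, hcur⟩ := hinv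
      have hcurc : cur ≤ c := hcur c (by simp)
      by_cases hceq : c = cur
      · have hstep : countAltStep (f2, f3, run, some cur) c = (f2, f3, run + 1, some cur) := by
          simp [countAltStep, hceq]
        rw [hstep]
        have hres := ih f2 f3 (run + 1) (some cur) hpw'
          ⟨by omega, fun y hy => hceq ▸ hc y hy⟩
        have hl : pvPre (run + 1) (some cur) ++ rest = pvPre run (some cur) ++ c :: rest := by
          simp only [pvPre]
          have ht : (run + 1).toNat = run.toNat + 1 := by omega
          rw [ht, List.replicate_succ', List.append_assoc, hceq]
          rfl
        rw [hl] at hres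
        exact hres
      · have hstep : countAltStep (f2, f3, run, some cur) c
            = (if run == 2 then true else f2, if run == 3 then true else f3, 1, some c) := by
          have hb : (c == cur) = false := by simpa using hceq
          simp [countAltStep, hb]
        rw [hstep]
        have hres := ih (if run == 2 then true else f2) (if run == 3 then true else f3)
          1 (some c) hpw' ⟨by norm_num, hc⟩
        have hnm : cur ∉ c :: rest := by
          intro hmem
          rcases List.mem_cons.mp hmem with h | h
          · exact hceq h.symm
          · exact absurd (lt_of_le_of_ne hcurc (fun e => hceq e.symm)) (not_lt.mpr (hc cur h))
        have h2 := exists_count_replicate_append (k := 2) (by norm_num) cur run.toNat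
          (c :: rest) hnm
        have h3 := exists_count_replicate_append (k := 3) (by norm_num) cur run.toNat
          (c :: rest) hnm
        have hpre1 : pvPre 1 (some c) ++ rest = c :: rest := by
          simp [pvPre]
        rw [hpre1] at hres
        simp only [pvPre]
        constructor
        · rw [hres.1, if_flag f2 run 2 2 rfl hr, h2]
          exact or_assoc
        · rw [hres.2, if_flag f3 run 3 3 rfl hr, h3]
          exact or_assoc

theorem countB_flags (x : String) :
    count_alt x
      = ((if x.toList.any (fun d => x.toList.count d == 2) then 1 else 0),
         (if x.toList.any (fun d => x.toList.count d == 3) then 1 else 0)) := by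
  have hperm : (PySem.List.sorted x.toList (fun c => c)).Perm x.toList :=
    PySem.List.sorted_perm x.toList (fun c => c) false
  have hpw : (PySem.List.sorted x.toList (fun c => c)).Pairwise (fun a b => a ≤ b) :=
    PySem.List.sorted_pairwise x.toList (fun c => c)
  unfold count_alt
  dsimp only
  cases hss : PySem.List.sorted x.toList (fun c => c) with
  | nil =>
    have hx : x.toList = [] := (PySem.List.sorted_eq_nil_iff _ _ _).mp hss
    simp [hx]
  | cons c rest =>
    rw [hss] at hpw hperm
    obtain ⟨hc, hpw'⟩ := List.pairwise_cons.mp hpw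
    have hstep : countAltStep (false, false, (0 : Int), none) c
        = (false, false, (1 : Int), some c) := by
      simp [countAltStep]
    rw [List.foldl_cons, hstep]
    have hsw := sweep_spec rest false false 1 (some c) hpw' ⟨by norm_num, hc⟩
    have hpre1 : pvPre 1 (some c) ++ rest = c :: rest := by simp [pvPre]
    rw [hpre1] at hsw
    have hPcongr : ∀ kN : Nat, (∃ d, (c :: rest).count d = kN)
        ↔ (∃ d, x.toList.count d = kN) :=
      fun kN => exists_congr (fun d => by rw [hperm.count_eq d])
    have e2 : (if (rest.foldl countAltStep (false, false, 1, some c)).2.2.1 == 2 then true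
        else (rest.foldl countAltStep (false, false, 1, some c)).1)
        = x.toList.any (fun d => x.toList.count d == 2) := by
      rw [Bool.eq_iff_iff, hsw.1, any_count_iff _ 2 (by norm_num)]
      simp only [Bool.false_eq_true, false_or]
      exact hPcongr 2
    have e3 : (if (rest.foldl countAltStep (false, false, 1, some c)).2.2.1 == 3 then true
        else (rest.foldl countAltStep (false, false, 1, some c)).2.1)
        = x.toList.any (fun d => x.toList.count d == 3) := by
      rw [Bool.eq_iff_iff, hsw.2, any_count_iff _ 3 (by norm_num)]
      simp only [Bool.false_eq_true, false_or]
      exact hPcongr 3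
    rw [e2, e3]

-- ===== VERDICT =====
theorem count_spec : Claim_equal_count := by
  intro x _
  unfold Spec_count
  rw [countA_flags, countB_flags]
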